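-- pv_equiv track=rewrite | github.com/wilsonfreitas/salim | src/salim/csvadapter.py | resolve_camel_case_property_name
-- ===== SOURCE A (Python) =====
-- def resolve_camel_case_property_name(attr_name):
--     '''
--     Convert human readable header names to camel case property names. Examples:
--
--     >>> resolve_property_name("Category")
--     "category"
--     >>> resolve_property_name("Bank Account")
--     "bankAccount"
--     '''
--     attr_name = str(attr_name).strip()
--     s = ''
--     to_upper = False
--     for c in attr_name:
--         if c in '\t ':
--             to_upper = True
--             continue
--         if to_upper:
--             s += c.upper()
--             to_upper = False
--         else:
--             s += c.lower()
--     return s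
-- ===== SOURCE B (Python) =====
-- def resolve_camel_case_property_name(attr_name):
--     # Tokenize-then-map: split the stripped header into words on space/tab,
--     # lowercase the first word, capitalize-first/lowercase-rest for the others.
--     words = str(attr_name).strip().replace('\t', ' ').split(' ')
--     return words[0].lower() + ''.join(w[:1].upper() + w[1:].lower() for w in words[1:])
-- ===== Notes on version B (the rewrite author's own statement) =====
-- stated objective: simpler
-- what changed: Replaced the per-character case/to_upper flag state machine with a tokenize-then-map pass: strip, normalize tabs to spaces, split into words on spaces, then lowercase the first word and capitalize-first/lowercase-rest of each remaining word.
import Mathlib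
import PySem

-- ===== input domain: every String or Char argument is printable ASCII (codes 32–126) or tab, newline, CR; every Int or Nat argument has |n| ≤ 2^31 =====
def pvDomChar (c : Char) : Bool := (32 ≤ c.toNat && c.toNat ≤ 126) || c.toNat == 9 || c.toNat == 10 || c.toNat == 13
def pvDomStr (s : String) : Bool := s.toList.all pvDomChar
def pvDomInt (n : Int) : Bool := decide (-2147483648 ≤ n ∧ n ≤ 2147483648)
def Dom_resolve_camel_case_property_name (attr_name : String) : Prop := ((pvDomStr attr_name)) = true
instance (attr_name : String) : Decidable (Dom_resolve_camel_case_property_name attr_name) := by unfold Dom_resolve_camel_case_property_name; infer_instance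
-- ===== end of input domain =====

-- B replaces A's per-character case/flag state machine by a tokenize-then-map pass
-- (strip, split into words on space/tab, lowercase the first word, capitalize the rest); objective: simpler.


-- ===== PORT A =====
-- 'attr_name = str(attr_name).strip()' then a char loop with state (s, to_upper);
-- strings are carried as List Char via PySem.Chars (exact on the stated domain).
def resolve_camel_case_property_name (attr_name : String) : String :=
  let cs := PySem.Chars.strip attr_name.toList
  let r := cs.foldl (fun (st : List Char × Bool) c =>
      if c = '\t' ∨ c = ' ' then (st.1, true)            -- if c in '\t ': to_upper = True; continue
      else if st.2 then (st.1 ++ [PySem.Chars.upperChar c], false)  -- s += c.upper()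
      else (st.1 ++ [PySem.Chars.lowerChar c], false))   -- s += c.lower()
    ([], false)
  String.ofList r.1

-- ===== PORT B =====
-- w[:1].upper() + w[1:].lower() of a word
def pvCapWord (w : List Char) : List Char :=
  match w with
  | [] => []
  | c :: r => PySem.Chars.upperChar c :: r.map PySem.Chars.lowerChar

-- words = str(attr_name).strip().replace('\t', ' ').split(' ')
-- return words[0].lower() + ''.join(w[:1].upper() + w[1:].lower() for w in words[1:])
-- (Chars.splitOn is PySem's s.split(sep) for a nonempty sep; words is nonempty by construction,
-- the [] branch is unreachable.)
def resolve_camel_case_property_name_alt (attr_name : String) : String :=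
  let words := PySem.Chars.splitOn
    (PySem.Chars.replace (PySem.Chars.strip attr_name.toList) ['\t'] [' ']) [' ']
  match words with
  | [] => ""
  | w :: ws => String.ofList (w.map PySem.Chars.lowerChar ++ (ws.map pvCapWord).flatten)

-- ===== PRECONDITION & SPEC =====
def Spec_resolve_camel_case_property_name (attr_name : String) (out : String) : Prop := out = resolve_camel_case_property_name_alt attr_name
instance (attr_name : String) (out : String) : Decidable (Spec_resolve_camel_case_property_name attr_name out) := by unfold Spec_resolve_camel_case_property_name; infer_instance

-- ===== CLAIM (what is proved, stated in full; the proofs are below) =====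
def Claim_equal_resolve_camel_case_property_name : Prop := ∀ (attr_name : String), Dom_resolve_camel_case_property_name attr_name → Spec_resolve_camel_case_property_name attr_name (resolve_camel_case_property_name attr_name)

-- ===== LEMMAS AND PROOFS =====

-- the value A's loop produces on a char list, as a structural recursion over (input, to_upper flag)
def pvCamel (cs : List Char) (b : Bool) : List Char :=
  match cs with
  | [] => []
  | c :: r =>
    if c = '\t' ∨ c = ' ' then pvCamel r true
    else (if b then PySem.Chars.upperChar c else PySem.Chars.lowerChar c) :: pvCamel r false

-- A's foldl equals pvCamel
theorem pvFoldA (cs : List Char) (acc : List Char) (b : Bool) :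
    (cs.foldl (fun (st : List Char × Bool) c =>
      if c = '\t' ∨ c = ' ' then (st.1, true)
      else if st.2 then (st.1 ++ [PySem.Chars.upperChar c], false)
      else (st.1 ++ [PySem.Chars.lowerChar c], false)) (acc, b)).1 = acc ++ pvCamel cs b := by
  induction cs generalizing acc b with
  | nil => simp [pvCamel]
  | cons c r ih =>
    by_cases hc : c = '\t' ∨ c = ' '
    · simp [List.foldl, pvCamel, hc, ih]
    · cases b <;> simp [List.foldl, pvCamel, hc, ih]

def pvTabMap (c : Char) : Char := if c = '\t' then ' ' else c

theorem pvReplaceGo (fuel : Nat) (l acc : List Char) (h : l.length ≤ fuel) :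
    PySem.Chars.replace.go ['\t'] [' '] fuel l acc = acc.reverse ++ l.map pvTabMap := by
  induction fuel generalizing l acc with
  | zero =>
    have : l = [] := List.length_eq_zero_iff.mp (Nat.le_zero.mp h)
    subst this; simp [PySem.Chars.replace.go]
  | succ n ih =>
    cases l with
    | nil => simp [PySem.Chars.replace.go]
    | cons c t =>
      by_cases hc : c = '\t'
      · subst hc
        have : (['\t'] : List Char).isPrefixOf ('\t' :: t) = true := by
          simp [List.isPrefixOf]
        simp only [PySem.Chars.replace.go, this, if_pos]
        rw [ih _ _ (by simpa using Nat.le_of_succ_le_succ h)]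
        simp [pvTabMap]
      · have : (['\t'] : List Char).isPrefixOf (c :: t) = false := by
          simp [List.isPrefixOf, Ne.symm hc]
        simp only [PySem.Chars.replace.go, this]
        rw [if_neg (by simp)]
        rw [ih _ _ (by simpa using Nat.le_of_succ_le_succ h)]
        simp [pvTabMap, hc]

theorem pvReplaceTab (cs : List Char) :
    PySem.Chars.replace cs ['\t'] [' '] = cs.map pvTabMap := by
  rw [PySem.Chars.replace]
  simp only [List.isEmpty]
  exact pvReplaceGo cs.length cs [] le_rfl

-- splitting on a single space, clean recursion
def pvSp1 (cs : List Char) (cur : List Char) : List (List Char) :=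
  match cs with
  | [] => [cur.reverse]
  | c :: r => if c = ' ' then cur.reverse :: pvSp1 r [] else pvSp1 r (c :: cur)

theorem pvSplitGo (fuel : Nat) (l cur : List Char) (acc : List (List Char)) (h : l.length < fuel) :
    PySem.Chars.splitOn.go [' '] fuel l cur acc = acc.reverse ++ pvSp1 l cur := by
  induction fuel generalizing l cur acc with
  | zero => omega
  | succ n ih =>
    cases l with
    | nil => simp [PySem.Chars.splitOn.go, pvSp1]
    | cons c t =>
      by_cases hc : c = ' '
      · subst hc
        have hp : ([' '] : List Char).isPrefixOf (' ' :: t) = true := by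
          simp [List.isPrefixOf]
        simp only [PySem.Chars.splitOn.go, hp, if_pos]
        rw [ih _ _ _ (by simpa using Nat.lt_of_succ_lt_succ h)]
        simp [pvSp1]
      · have hp : ([' '] : List Char).isPrefixOf (c :: t) = false := by
          simp [List.isPrefixOf, Ne.symm hc]
        simp only [PySem.Chars.splitOn.go, hp]
        rw [if_neg (by simp)]
        rw [ih _ _ _ (by simpa using Nat.lt_of_succ_lt_succ h)]
        simp [pvSp1, hc]

theorem pvSplitOn_eq (cs : List Char) :
    PySem.Chars.splitOn cs [' '] = pvSp1 cs [] := by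
  rw [PySem.Chars.splitOn]
  simpa using pvSplitGo (cs.length + 1) cs [] [] (by omega)

theorem pvSp1_ne_nil (cs cur : List Char) : pvSp1 cs cur ≠ [] := by
  induction cs generalizing cur with
  | nil => simp [pvSp1]
  | cons c r ih => by_cases hc : c = ' ' <;> simp [pvSp1, hc, ih]

theorem pvSp1_modifyHead (cs : List Char) (cur : List Char) :
    pvSp1 cs cur = (pvSp1 cs []).modifyHead (cur.reverse ++ ·) := by
  induction cs generalizing cur with
  | nil => simp [pvSp1]
  | cons c r ih =>
    by_cases hc : c = ' '
    · simp [pvSp1, hc]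
    · obtain ⟨w, ws, hw⟩ := List.exists_cons_of_ne_nil (pvSp1_ne_nil r [])
      simp only [pvSp1, hc, ite_false]
      rw [ih (c :: cur), ih [c], hw]
      simp

-- pvCamel depends on the input only through pvTabMap
theorem pvCamel_map_tab (cs : List Char) (b : Bool) :
    pvCamel (cs.map pvTabMap) b = pvCamel cs b := by
  induction cs generalizing b with
  | nil => simp
  | cons c r ih =>
    by_cases hc : c = '\t' ∨ c = ' '
    · have : pvTabMap c = ' ' := by rcases hc with h | h <;> subst h <;> decide
      simp [pvCamel, this, hc, ih]
    · have : pvTabMap c = c := by simp [pvTabMap, show c ≠ '\t' from fun hh => hc (Or.inl hh)]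
      simp [pvCamel, this, hc, ih]

-- joint characterization of B's assembly in terms of pvCamel (no tab in the input)
theorem pvGlue (cs : List Char) (h : '\t' ∉ cs) :
    (match pvSp1 cs [] with
     | [] => []
     | w :: ws => w.map PySem.Chars.lowerChar ++ (ws.map pvCapWord).flatten) = pvCamel cs false
    ∧ ((pvSp1 cs []).map pvCapWord).flatten = pvCamel cs true := by
  induction cs with
  | nil => simp [pvSp1, pvCamel, pvCapWord]
  | cons c r ih =>
    have hct : c ≠ '\t' := fun hh => h (hh ▸ List.mem_cons_self ..)
    have hr : '\t' ∉ r := fun hh => h (List.mem_cons_of_mem _ hh)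
    obtain ⟨ihP, ihQ⟩ := ih hr
    by_cases hc : c = ' '
    · subst hc
      constructor
      · simp only [pvSp1, List.reverse_nil]
        simpa [pvCamel] using ihQ
      · simp only [pvSp1, List.reverse_nil]
        simpa [pvCamel, pvCapWord] using ihQ
    · obtain ⟨w, ws, hw⟩ := List.exists_cons_of_ne_nil (pvSp1_ne_nil r [])
      have hsp : pvSp1 (c :: r) [] = (c :: w) :: ws := by
        simp only [pvSp1, hc, ite_false]
        rw [pvSp1_modifyHead r [c], hw]; simp
      have hcam : pvCamel (c :: r) false = PySem.Chars.lowerChar c :: pvCamel r false := by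
        simp [pvCamel, hc, hct]
      have hcam' : pvCamel (c :: r) true = PySem.Chars.upperChar c :: pvCamel r false := by
        simp [pvCamel, hc, hct]
      rw [hw] at ihP ihQ
      constructor
      · rw [hsp, hcam]
        simpa using ihP
      · rw [hsp, hcam']
        simp only [List.map_cons, List.flatten_cons, pvCapWord]
        simpa using ihP

-- ===== VERDICT (by name: the statement is the Claim_ definition above) =====
theorem resolve_camel_case_property_name_spec : Claim_equal_resolve_camel_case_property_name := by
  intro s _
  unfold Spec_resolve_camel_case_property_name resolve_camel_case_property_name
    resolve_camel_case_property_name_alt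
  simp only []
  rw [pvFoldA, pvReplaceTab, pvSplitOn_eq]
  have hnt : '\t' ∉ (PySem.Chars.strip s.toList).map pvTabMap := by
    intro hm
    obtain ⟨c, _, hc⟩ := List.mem_map.mp hm
    by_cases h : c = '\t' <;> simp [pvTabMap, h] at hc
  obtain ⟨hP, _⟩ := pvGlue _ hnt
  rw [pvCamel_map_tab] at hP
  rw [← hP]
  cases hsp : pvSp1 ((PySem.Chars.strip s.toList).map pvTabMap) [] with
  | nil => exact absurd hsp (pvSp1_ne_nil _ _)
  | cons w ws => simp
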